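-- pv_equiv track=rewrite | github.com/ekouakou/APP_RADAR_CHECK | radar_check_api_python/pythonProject/myClass/AnalyseurTirage.py | trouver_suites_polygonaux
-- ===== SOURCE A (Python) =====
-- def trouver_suites_polygonaux(numeros, params):
--     """
--     Trouve les nombres polygonaux généralisés dans une liste de nombres.
--     Le n-ième nombre s-gonal est donné par: P(s,n) = (s-2)*n*(n-1)/2 + n
--     """
--     resultats = []
--     max_val = max(numeros) if numeros else 90  # Déterminer la valeur maximale utile
--
--     for s in range(3, 10):  # Tester des polygones de 3 à 9 côtés
--         polygonaux = []
--         polygonaux_ref = set()  # Utilisation d'un ensemble pour une recherche rapide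
--
--         # Générer les nombres s-gonaux jusqu'à la valeur max trouvée
--         n = 1
--         while True:
--             p_n = (s - 2) * n * (n - 1) // 2 + n
--             if p_n > max_val:
--                 break
--             polygonaux_ref.add(p_n)
--             n += 1
--
--         # Vérifier quels nombres de la liste sont polygonaux de type `s`
--         polygonaux = sorted([num for num in numeros if num in polygonaux_ref])
--
--         # Vérifier que la suite contient suffisamment d'éléments
--         if len(polygonaux) >= params.get('min_elements', 3):  # Valeur par défaut 3
--             raisons = [polygonaux[i + 1] - polygonaux[i] for i in range(len(polygonaux) - 1)]
--             resultats.append((polygonaux, raisons))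
--
--     return resultats
-- ===== SOURCE B (Python) =====
-- def _est_polygonal(s, num):
--     # closed membership test: is num = (s-2)*n*(n-1)//2 + n for some integer n >= 1?
--     # binary search on n (the polygonal sequence is strictly increasing for s >= 3)
--     if num < 1:
--         return False
--     lo, hi = 1, num
--     while lo <= hi:
--         mid = (lo + hi) // 2
--         v = (s - 2) * mid * (mid - 1) // 2 + mid
--         if v == num:
--             return True
--         if v < num:
--             lo = mid + 1
--         else:
--             hi = mid - 1
--     return False
--
--
-- def trouver_suites_polygonaux(numeros, params):
--     resultats = []
--     min_elements = params.get('min_elements', 3)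
--     for s in range(3, 10):
--         polygonaux = sorted(num for num in numeros if _est_polygonal(s, num))
--         if len(polygonaux) >= min_elements:
--             raisons = [b - a for a, b in zip(polygonaux, polygonaux[1:])]
--             resultats.append((polygonaux, raisons))
--     return resultats
-- ===== Notes on version B (the rewrite author's own statement) =====
-- stated objective: alternative
-- what changed: Replaces generating the whole table of s-gonal numbers up to max(numeros) into a set and filtering against it by a direct per-element membership test that binary-searches the rank n with (s-2)n(n-1)/2+n = num; no max value and no set are computed.
import Mathlib
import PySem

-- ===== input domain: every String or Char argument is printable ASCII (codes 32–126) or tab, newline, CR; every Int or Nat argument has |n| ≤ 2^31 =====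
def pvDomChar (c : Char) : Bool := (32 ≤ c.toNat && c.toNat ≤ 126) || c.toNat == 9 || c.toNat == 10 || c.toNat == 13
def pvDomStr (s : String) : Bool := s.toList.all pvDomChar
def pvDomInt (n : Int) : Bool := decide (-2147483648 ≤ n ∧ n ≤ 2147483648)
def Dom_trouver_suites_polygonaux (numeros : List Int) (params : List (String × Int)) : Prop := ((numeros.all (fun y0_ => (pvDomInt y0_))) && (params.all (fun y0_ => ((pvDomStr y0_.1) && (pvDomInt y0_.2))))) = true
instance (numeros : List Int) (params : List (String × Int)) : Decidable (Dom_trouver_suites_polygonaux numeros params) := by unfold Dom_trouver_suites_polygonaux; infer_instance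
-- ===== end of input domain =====

-- B replaces A's generate-all-polygonals-into-a-set-then-filter strategy by a direct
-- per-element membership test (binary search on the rank n); alternative decomposition, not claimed faster.


-- ===== PORT A =====
-- p_n = (s - 2) * n * (n - 1) // 2 + n
def pvPolyA (s n : Int) : Int := PySem.Int.floordiv ((s - 2) * n * (n - 1)) 2 + n

-- the 'while True: … break' generation loop; fuel only makes it total (enough fuel is supplied below).
-- p_n is strictly increasing in n (s ≥ 3), so every add inserts a fresh element: this cons-list holds
-- exactly the Python set's distinct elements, and membership is the only way the set is consumed.
def pvGenAux (s maxVal : Int) : Nat → Int → PySem.Set Int → PySem.Set Int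
  | 0, _, acc => acc
  | fuel + 1, n, acc =>
    let p := pvPolyA s n
    if p > maxVal then acc
    else pvGenAux s maxVal fuel (n + 1) (p :: acc)

def trouver_suites_polygonaux (numeros : List Int) (params : List (String × Int)) : List (List Int × List Int) :=
  let maxVal : Int := match PySem.List.max? numeros (fun x => x) with
    | some m => m
    | none => 90
  (PySem.List.pyRange 3 10 1).foldl (fun resultats s =>
    let polygonauxRef : PySem.Set Int := pvGenAux s maxVal (maxVal.toNat + 1) 1 []
    let polygonaux := PySem.List.sorted (numeros.filter (fun num => PySem.Set.contains polygonauxRef num)) (fun x => x) false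
    if PySem.List.len polygonaux ≥ PySem.Dict.getD (PySem.Dict.mk params) "min_elements" 3 then
      resultats ++ [(polygonaux,
        (PySem.List.pyRange 0 (PySem.List.len polygonaux - 1) 1).map
          (fun i => PySem.List.pyGetD polygonaux (i + 1) 0 - PySem.List.pyGetD polygonaux i 0))]
    else resultats) []

-- ===== PORT B =====
-- binary search for n ≥ 1 with (s-2)n(n-1)//2 + n = num; fuel only makes the while-loop total
def pvBsearch (s num : Int) : Nat → Int → Int → Bool
  | 0, _, _ => false
  | fuel + 1, lo, hi =>
    if lo ≤ hi then
      let mid := PySem.Int.floordiv (lo + hi) 2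
      let v := PySem.Int.floordiv ((s - 2) * mid * (mid - 1)) 2 + mid
      if v = num then true
      else if v < num then pvBsearch s num fuel (mid + 1) hi
      else pvBsearch s num fuel lo (mid - 1)
    else false

def pvEstPolygonal (s num : Int) : Bool :=
  if num < 1 then false
  else pvBsearch s num (num.toNat + 1) 1 num

def trouver_suites_polygonaux_alt (numeros : List Int) (params : List (String × Int)) : List (List Int × List Int) :=
  let minElements := PySem.Dict.getD (PySem.Dict.mk params) "min_elements" 3
  (PySem.List.pyRange 3 10 1).foldl (fun resultats s =>
    let polygonaux := PySem.List.sorted (numeros.filter (fun num => pvEstPolygonal s num)) (fun x => x) false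
    if PySem.List.len polygonaux ≥ minElements then
      resultats ++ [(polygonaux, (polygonaux.zip polygonaux.tail).map (fun p => p.2 - p.1))]
    else resultats) []

-- ===== PRECONDITION & SPEC =====
def Spec_trouver_suites_polygonaux (numeros : List Int) (params : List (String × Int)) (out : List (List Int × List Int)) : Prop := out = trouver_suites_polygonaux_alt numeros params
instance (numeros : List Int) (params : List (String × Int)) (out : List (List Int × List Int)) : Decidable (Spec_trouver_suites_polygonaux numeros params out) := by unfold Spec_trouver_suites_polygonaux; infer_instance

-- ===== CLAIM (what is proved, stated in full; the proofs are below) =====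
def Claim_equal_trouver_suites_polygonaux : Prop := ∀ (numeros : List Int) (params : List (String × Int)), Dom_trouver_suites_polygonaux numeros params → Spec_trouver_suites_polygonaux numeros params (trouver_suites_polygonaux numeros params)

-- ===== LEMMAS AND PROOFS =====

theorem pvPolyA_double (s n : Int) : 2 * pvPolyA s n = (s - 2) * n * (n - 1) + 2 * n := by
  have h2 : (2 : Int) ∣ n * (n - 1) := (Int.even_mul_pred_self n).two_dvd
  have hdvd : (2 : Int) ∣ (s - 2) * n * (n - 1) := by
    rw [mul_assoc]; exact h2.mul_left _
  unfold pvPolyA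
  rw [PySem.Int.floordiv_eq_ediv_of_pos (by norm_num)]
  rw [mul_add, Int.mul_ediv_cancel' hdvd]

theorem le_pvPolyA (s n : Int) (h3 : 3 ≤ s) (hn : 1 ≤ n) : n ≤ pvPolyA s n := by
  have h1 := pvPolyA_double s n
  nlinarith [mul_nonneg (mul_nonneg (by omega : (0:Int) ≤ s - 2) (by omega : (0:Int) ≤ n)) (by omega : (0:Int) ≤ n - 1)]

theorem pvPolyA_mono (s n m : Int) (h3 : 3 ≤ s) (hn : 1 ≤ n) (hnm : n ≤ m) :
    pvPolyA s n ≤ pvPolyA s m := by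
  have h1 := pvPolyA_double s n
  have h2 := pvPolyA_double s m
  nlinarith [mul_nonneg (by omega : (0:Int) ≤ s - 2) (mul_nonneg (by omega : (0:Int) ≤ m + n - 1) (by omega : (0:Int) ≤ m - n))]

theorem mem_pvGenAux (s maxVal : Int) (h3 : 3 ≤ s) (x : Int) :
    ∀ (fuel : Nat) (n : Int) (acc : PySem.Set Int), 1 ≤ n → (maxVal - n + 1).toNat ≤ fuel →
      (x ∈ pvGenAux s maxVal fuel n acc ↔
        x ∈ acc ∨ ∃ m, n ≤ m ∧ pvPolyA s m ≤ maxVal ∧ pvPolyA s m = x) := by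
  intro fuel
  induction fuel with
  | zero =>
    intro n acc hn hfuel
    simp only [pvGenAux]
    constructor
    · intro h; exact Or.inl h
    · rintro (h | ⟨m, hm, hle, _⟩)
      · exact h
      · exfalso
        have h1 := le_pvPolyA s m h3 (by omega)
        omega
  | succ fuel ih =>
    intro n acc hn hfuel
    simp only [pvGenAux]
    by_cases hbreak : pvPolyA s n > maxVal
    · simp only [hbreak, if_true]
      constructor
      · intro h; exact Or.inl h
      · rintro (h | ⟨m, hm, hle, _⟩)
        · exact h
        · exfalso
          have := pvPolyA_mono s n m h3 hn hm
          omega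
    · simp only [hbreak, if_false]
      have hple : pvPolyA s n ≤ maxVal := by omega
      have hnmax : n ≤ maxVal := le_trans (le_pvPolyA s n h3 hn) hple
      rw [ih (n + 1) _ (by omega) (by omega)]
      simp only [List.mem_cons]
      constructor
      · rintro ((h | h) | ⟨m, hm, hle, hx⟩)
        · exact Or.inr ⟨n, le_refl n, hple, h.symm⟩
        · exact Or.inl h
        · exact Or.inr ⟨m, by omega, hle, hx⟩
      · rintro (h | ⟨m, hm, hle, hx⟩)
        · exact Or.inl (Or.inr h)
        · rcases eq_or_lt_of_le hm with heq | hlt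
          · exact Or.inl (Or.inl (by rw [← heq] at hx; exact hx.symm))
          · exact Or.inr ⟨m, by omega, hle, hx⟩

theorem pvBsearch_iff (s num : Int) (h3 : 3 ≤ s) :
    ∀ (fuel : Nat) (lo hi : Int), 1 ≤ lo → (hi - lo + 1).toNat ≤ fuel →
      (pvBsearch s num fuel lo hi = true ↔ ∃ m, lo ≤ m ∧ m ≤ hi ∧ pvPolyA s m = num) := by
  intro fuel
  induction fuel with
  | zero =>
    intro lo hi hlo hfuel
    simp only [pvBsearch]
    constructor
    · intro h; exact absurd h (by simp)
    · rintro ⟨m, h1, h2, _⟩; omega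
  | succ fuel ih =>
    intro lo hi hlo hfuel
    simp only [pvBsearch]
    by_cases hle : lo ≤ hi
    · simp only [hle, if_true]
      have hmid := PySem.Int.floordiv_two_mid_bounds hle
      set mid := PySem.Int.floordiv (lo + hi) 2 with hmiddef
      have hv : PySem.Int.floordiv ((s - 2) * mid * (mid - 1)) 2 + mid = pvPolyA s mid := rfl
      rw [hv]
      by_cases heq : pvPolyA s mid = num
      · rw [if_pos heq]
        constructor
        · intro _; exact ⟨mid, hmid.1, hmid.2, heq⟩
        · intro _; rfl
      · rw [if_neg heq]
        by_cases hlt : pvPolyA s mid < num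
        · rw [if_pos hlt]
          rw [ih (mid + 1) hi (by omega) (by omega)]
          constructor
          · rintro ⟨m, h1, h2, h4⟩; exact ⟨m, by omega, h2, h4⟩
          · rintro ⟨m, h1, h2, h4⟩
            refine ⟨m, ?_, h2, h4⟩
            by_contra hcon
            have : pvPolyA s m ≤ pvPolyA s mid := pvPolyA_mono s m mid h3 (by omega) (by omega)
            omega
        · rw [if_neg hlt]
          rw [ih lo (mid - 1) hlo (by omega)]
          constructor
          · rintro ⟨m, h1, h2, h4⟩; exact ⟨m, h1, by omega, h4⟩
          · rintro ⟨m, h1, h2, h4⟩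
            refine ⟨m, h1, ?_, h4⟩
            by_contra hcon
            have : pvPolyA s mid ≤ pvPolyA s m := pvPolyA_mono s mid m h3 (by omega) (by omega)
            omega
    · simp only [hle, if_false]
      constructor
      · intro h; exact absurd h (by simp)
      · rintro ⟨m, h1, h2, _⟩; omega

theorem pvEstPolygonal_iff (s num : Int) (h3 : 3 ≤ s) :
    pvEstPolygonal s num = true ↔ ∃ m, 1 ≤ m ∧ pvPolyA s m = num := by
  unfold pvEstPolygonal
  by_cases hneg : num < 1
  · rw [if_pos hneg]
    constructor
    · intro h; exact absurd h (by simp)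
    · rintro ⟨m, hm, hx⟩
      have := le_pvPolyA s m h3 hm
      omega
  · rw [if_neg hneg]
    rw [pvBsearch_iff s num h3 (num.toNat + 1) 1 num (by omega) (by omega)]
    constructor
    · rintro ⟨m, h1, _, h4⟩; exact ⟨m, h1, h4⟩
    · rintro ⟨m, h1, h4⟩
      have := le_pvPolyA s m h3 h1
      exact ⟨m, h1, by omega, h4⟩

-- A's membership test agrees with B's for every element of the list
theorem filter_eq (s : Int) (h3 : 3 ≤ s) (numeros : List Int) (maxVal : Int)
    (hmax : ∀ y ∈ numeros, y ≤ maxVal) :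
    numeros.filter (fun num => PySem.Set.contains (pvGenAux s maxVal (maxVal.toNat + 1) 1 []) num)
      = numeros.filter (fun num => pvEstPolygonal s num) := by
  apply List.filter_congr
  intro num hnum
  rw [Bool.eq_iff_iff, PySem.Set.contains_iff, pvEstPolygonal_iff s num h3]
  rw [mem_pvGenAux s maxVal h3 num (maxVal.toNat + 1) 1 [] (by omega) (by omega)]
  constructor
  · rintro (h | ⟨m, h1, _, h4⟩)
    · exact absurd h (List.not_mem_nil)
    · exact ⟨m, h1, h4⟩
  · rintro ⟨m, h1, h4⟩
    exact Or.inr ⟨m, h1, by rw [h4]; exact hmax num hnum, h4⟩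

-- the two ways of building the gap list agree
theorem raisons_eq (l : List Int) :
    (PySem.List.pyRange 0 (PySem.List.len l - 1) 1).map
        (fun i => PySem.List.pyGetD l (i + 1) 0 - PySem.List.pyGetD l i 0)
      = (l.zip l.tail).map (fun p => p.2 - p.1) := by
  apply List.ext_getElem
  · simp [PySem.List.length_pyRange_one, PySem.List.len]
  · intro k h1 h2
    have hk : k < l.length - 1 := by
      simp [PySem.List.length_pyRange_one, PySem.List.len] at h1
      omega
    simp only [List.getElem_map, PySem.List.getElem_pyRange_one, List.getElem_zip, List.getElem_tail]
    have e1 : (0 : Int) + (k : Int) + 1 = ((k + 1 : Nat) : Int) := by omega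
    have e2 : (0 : Int) + (k : Int) = ((k : Nat) : Int) := by omega
    rw [e1, e2, PySem.List.pyGetD_natCast, PySem.List.pyGetD_natCast]
    rw [List.getD_eq_getElem l 0 (by omega), List.getD_eq_getElem l 0 (by omega)]

-- ===== VERDICT (by name: the statement is the Claim_ definition above) =====
theorem trouver_suites_polygonaux_spec : Claim_equal_trouver_suites_polygonaux := by
  intro numeros params _
  unfold Spec_trouver_suites_polygonaux trouver_suites_polygonaux trouver_suites_polygonaux_alt
  have hmax : ∀ y ∈ numeros, y ≤ (match PySem.List.max? numeros (fun x => x) with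
      | some m => m | none => (90 : Int)) := by
    cases hcase : PySem.List.max? numeros (fun x => x) with
    | some m =>
      intro y hy
      simpa using PySem.List.max?_isMax hcase y hy
    | none =>
      rw [PySem.List.max?_eq_none_iff] at hcase
      subst hcase
      intro y hy
      cases hy
  dsimp only
  apply PySem.List.foldl_congr_mem
  intro acc s hs
  rw [PySem.List.mem_pyRange_one] at hs
  dsimp only
  rw [filter_eq s (by omega) numeros _ hmax, raisons_eq]
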